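-- pv_equiv track=rewrite | github.com/ashborn3/Codeforces-Solutions | Codeforces Round 966 (Div. 3)/B.py | check_boarding_rules
-- ===== SOURCE A (Python) =====
-- def check_boarding_rules(t, test_cases):
--     results = []
--     for case in test_cases:
--         n, a = case
--         occupied = set()
--         valid = True
--         for i in range(n):
--             seat = a[i]
--             if i == 0:
--                 occupied.add(seat)
--             else:
--                 if (seat - 1 not in occupied) and (seat + 1 not in occupied):
--                     valid = False
--                     break
--                 occupied.add(seat)
--         if valid:
--             results.append("YES")
--         else:
--             results.append("NO")
--     return results
-- ===== SOURCE B (Python) =====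
-- def _case_ok(n, a):
--     # No (or nonpositive) passenger count: trivially valid.
--     if n <= 0:
--         return True
--     # Occupied seats always form one contiguous interval [lo, hi]:
--     # the rule admits a seat exactly when a neighbouring seat is occupied.
--     lo = hi = a[0]
--     for s in a[1:n]:
--         if lo <= s - 1 <= hi or lo <= s + 1 <= hi:
--             lo = min(lo, s)
--             hi = max(hi, s)
--         else:
--             return False
--     return True
--
--
-- def check_boarding_rules(t, test_cases):
--     return ["YES" if _case_ok(n, a) else "NO" for n, a in test_cases]
-- ===== Notes on version B (the rewrite author's own statement) =====
-- stated objective: simpler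
-- what changed: B replaces A's growing occupied-set and membership tests by two integers lo/hi (the occupied seats always form one contiguous interval), checking the neighbour rule by pure arithmetic comparisons and extracting the per-case check into a small helper with early return.
-- outside the precondition, e.g. on check_boarding_rules(1, [(3, [1, 5])]): A returns ['NO'], B returns ['NO']
import Mathlib
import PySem

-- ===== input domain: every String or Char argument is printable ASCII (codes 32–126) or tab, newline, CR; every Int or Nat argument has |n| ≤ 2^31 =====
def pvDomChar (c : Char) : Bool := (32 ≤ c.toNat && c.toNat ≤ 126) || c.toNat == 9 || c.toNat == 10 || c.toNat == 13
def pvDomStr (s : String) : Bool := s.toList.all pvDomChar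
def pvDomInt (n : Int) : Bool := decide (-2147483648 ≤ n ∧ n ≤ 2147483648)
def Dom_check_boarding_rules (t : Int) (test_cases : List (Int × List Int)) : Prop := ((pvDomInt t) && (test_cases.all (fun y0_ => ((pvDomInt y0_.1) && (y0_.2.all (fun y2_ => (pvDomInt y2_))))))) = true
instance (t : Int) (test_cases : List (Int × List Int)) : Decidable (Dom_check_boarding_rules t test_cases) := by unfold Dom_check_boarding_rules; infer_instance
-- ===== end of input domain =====

-- B replaces A's occupied set with the interval [lo, hi] it always equals; equality of return values proved on Pre_ (each case's n within the seat list's length).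

-- ===== PORT A =====
-- inner 'for i in range(n)' loop of A; carries the occupied set, returns 'valid'.
-- a[i] is ported as (pyGet? a i).getD 0: exact under Pre_ (every index 0..n-1 in range).
def pvALoop (a : List Int) : List Int → PySem.Set Int → Bool
  | [], _ => true
  | i :: rest, occupied =>
    let seat := (PySem.List.pyGet? a i).getD 0
    if i == 0 then
      pvALoop a rest (PySem.Set.add occupied seat)
    else if ¬ (PySem.Set.contains occupied (seat - 1)) ∧ ¬ (PySem.Set.contains occupied (seat + 1)) then
      false
    else
      pvALoop a rest (PySem.Set.add occupied seat)

def check_boarding_rules (_t : Int) (test_cases : List (Int × List Int)) : List String :=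
  test_cases.map (fun case =>
    if pvALoop case.2 (PySem.List.pyRange 0 case.1 1) PySem.Set.empty then "YES" else "NO")

-- ===== PORT B =====
-- inner 'for s in a[1:n]' loop of B; carries only the interval bounds lo, hi.
def pvBLoop : Int → Int → List Int → Bool
  | _, _, [] => true
  | lo, hi, s :: rest =>
    if (lo ≤ s - 1 ∧ s - 1 ≤ hi) ∨ (lo ≤ s + 1 ∧ s + 1 ≤ hi) then
      pvBLoop (min lo s) (max hi s) rest
    else
      false

def pvCaseOk (n : Int) (a : List Int) : Bool :=
  if n ≤ 0 then true
  else
    let first := (PySem.List.pyGet? a 0).getD 0  -- a[0]; under Pre_, a is nonempty here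
    pvBLoop first first (PySem.List.slice a (some 1) (some n))

def check_boarding_rules_alt (_t : Int) (test_cases : List (Int × List Int)) : List String :=
  test_cases.map (fun case => if pvCaseOk case.1 case.2 then "YES" else "NO")

-- ===== PRECONDITION & SPEC =====
-- Pre_ excludes cases whose count n exceeds the seat list's length: there A raises IndexError
-- unless an earlier seat already broke the loop (see claim.json cites for one such returning input).
def Pre_check_boarding_rules (t : Int) (test_cases : List (Int × List Int)) : Prop :=
  ∀ case ∈ test_cases, case.1 ≤ (case.2.length : Int)
instance (t : Int) (test_cases : List (Int × List Int)) : Decidable (Pre_check_boarding_rules t test_cases) := by unfold Pre_check_boarding_rules; infer_instance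

def pvWitness_check_boarding_rules : Int × (List (Int × List Int)) :=
  (2, [(2, [3, 4]), (3, [5, 7, 6])])

def Spec_check_boarding_rules (t : Int) (test_cases : List (Int × List Int)) (out : List String) : Prop := out = check_boarding_rules_alt t test_cases
instance (t : Int) (test_cases : List (Int × List Int)) (out : List String) : Decidable (Spec_check_boarding_rules t test_cases out) := by unfold Spec_check_boarding_rules; infer_instance

-- ===== CLAIM (what is proved, stated in full; the proofs are below) =====
def Claim_equal_check_boarding_rules : Prop := ∀ (t : Int) (test_cases : List (Int × List Int)), Dom_check_boarding_rules t test_cases → Pre_check_boarding_rules t test_cases → Spec_check_boarding_rules t test_cases (check_boarding_rules t test_cases)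

-- ===== LEMMAS AND PROOFS =====

-- occupied = exactly [lo,hi] turns a membership test into an arithmetic comparison
lemma pvContains_interval (occ : PySem.Set Int) (lo hi x : Int)
    (hocc : ∀ y : Int, y ∈ occ ↔ lo ≤ y ∧ y ≤ hi) :
    PySem.Set.contains occ x = decide (lo ≤ x ∧ x ≤ hi) := by
  by_cases h : lo ≤ x ∧ x ≤ hi
  · simp only [h]
    exact (PySem.Set.contains_iff occ x).2 ((hocc x).2 h)
  · simp only [h, decide_false]
    rw [← Bool.not_eq_true, PySem.Set.contains_iff occ x]
    exact fun hx => h ((hocc x).1 hx)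

-- Key step: the index-driven A-loop from index i with occupied = exactly the interval [lo, hi]
-- equals the seat-driven B-loop on the slice a[i:n].
lemma pvLoop_agree (k : Nat) : ∀ (a : List Int) (i n : Int) (occ : PySem.Set Int) (lo hi : Int),
    (n - i).toNat = k → 1 ≤ i → 0 ≤ n → n ≤ (a.length : Int) →
    (∀ x : Int, x ∈ occ ↔ lo ≤ x ∧ x ≤ hi) →
    pvALoop a (PySem.List.pyRange i n 1) occ = pvBLoop lo hi (PySem.List.slice a (some i) (some n)) := by
  induction k with
  | zero =>
    intro a i n occ lo hi hk hi1 hn0 hlen _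
    have hni : n ≤ i := by omega
    rw [PySem.List.pyRange_one_eq_nil hni,
      PySem.List.slice_toNat a (by omega) hn0]
    have : n.toNat - i.toNat = 0 := by omega
    simp [this, pvALoop, pvBLoop]
  | succ k ih =>
    intro a i n occ lo hi hk hi1 hn0 hlen hocc
    have hin : i < n := by omega
    rw [PySem.List.pyRange_one_cons hin]
    have hidx : i.toNat < a.length := by omega
    have hget : PySem.List.pyGet? a i = some a[i.toNat] :=
      PySem.List.pyGet?_eq_some_getElem a (by omega) (by omega)
    -- slice a[i:n] = a[i] :: a[i+1:n]
    have hslice : PySem.List.slice a (some i) (some n)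
        = a[i.toNat] :: PySem.List.slice a (some (i+1)) (some n) := by
      rw [PySem.List.slice_toNat a (by omega) hn0, PySem.List.slice_toNat a (by omega) hn0]
      rw [List.drop_eq_getElem_cons hidx]
      have h1 : (i+1).toNat = i.toNat + 1 := by omega
      have h2 : n.toNat - i.toNat = (n.toNat - (i.toNat + 1)) + 1 := by omega
      rw [h1, h2, List.take_succ_cons]
    rw [hslice]
    set s := a[i.toNat] with hs
    have hiz : (i == (0:Int)) = false := by
      rw [beq_eq_false_iff_ne]; omega
    simp only [pvALoop, pvBLoop, hget, hiz, Option.getD_some, Bool.false_eq_true, if_false]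
    have hc1 := pvContains_interval occ lo hi (s - 1) hocc
    have hc2 := pvContains_interval occ lo hi (s + 1) hocc
    by_cases hcond : (lo ≤ s - 1 ∧ s - 1 ≤ hi) ∨ (lo ≤ s + 1 ∧ s + 1 ≤ hi)
    · -- accepted: both loops recurse, interval grows to [min lo s, max hi s]
      have hnot : ¬(¬ (PySem.Set.contains occ (s - 1)) = true ∧ ¬ (PySem.Set.contains occ (s + 1)) = true) := by
        rw [hc1, hc2]; rcases hcond with h | h <;> simp [h]
      rw [if_neg hnot, if_pos hcond]
      exact ih a (i+1) n (PySem.Set.add occ s) (min lo s) (max hi s)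
        (by omega) (by omega) hn0 hlen
        (by
          intro x
          rw [PySem.Set.mem_add]
          constructor
          · rintro (hx | rfl)
            · have := (hocc x).1 hx; omega
            · omega
          · intro hx
            by_cases hxs : x = s
            · exact Or.inr hxs
            · exact Or.inl ((hocc x).2 (by omega)))
    · -- rejected: both loops return false
      have hyes : (¬ (PySem.Set.contains occ (s - 1)) = true ∧ ¬ (PySem.Set.contains occ (s + 1)) = true) := by
        rw [hc1, hc2]
        constructor <;> simp <;> omega
      rw [if_pos hyes, if_neg hcond]

-- Per-case agreement under the precondition.
lemma pvCase_agree (n : Int) (a : List Int) (hlen : n ≤ (a.length : Int)) :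
    pvALoop a (PySem.List.pyRange 0 n 1) PySem.Set.empty = pvCaseOk n a := by
  by_cases hn : n ≤ 0
  · rw [PySem.List.pyRange_one_eq_nil hn]
    simp [pvALoop, pvCaseOk, hn]
  · rw [not_le] at hn
    have hlp : 0 < a.length := by omega
    rw [PySem.List.pyRange_one_cons hn]
    have hget : PySem.List.pyGet? a (0 : Int) = some a[(0 : Int).toNat] :=
      PySem.List.pyGet?_eq_some_getElem a le_rfl (by exact_mod_cast hlp)
    simp only [pvALoop, pvCaseOk, hget, Option.getD_some, beq_self_eq_true, if_true,
      if_neg (not_le.2 hn), zero_add]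
    exact pvLoop_agree (n - 1).toNat a 1 n (PySem.Set.add PySem.Set.empty a[(0 : Int).toNat]) a[(0 : Int).toNat] a[(0 : Int).toNat]
      (by omega) le_rfl (by omega) hlen
      (by
        intro x
        rw [PySem.Set.mem_add]
        constructor
        · rintro (hx | rfl)
          · simp [PySem.Set.empty] at hx
          · omega
        · intro hx
          exact Or.inr (by omega))

-- ===== VERDICT (by name: the statement is the Claim_ definition above) =====
theorem check_boarding_rules_spec : Claim_equal_check_boarding_rules := by
  intro t test_cases _ hpre
  unfold Spec_check_boarding_rules check_boarding_rules check_boarding_rules_alt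
  apply List.map_congr_left
  intro case hmem
  rw [pvCase_agree case.1 case.2 (hpre case hmem)]
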